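-- pv_equiv track=rewrite | github.com/googydeath/AmpyFin | trading_client.py | majority_decision_and_min_quantity
-- ===== SOURCE A (Python) =====
-- from collections import Counter
--
-- def majority_decision_and_min_quantity(decisions_and_quantities):
--     """
--     Determines the majority decision (buy, sell, or hold) and returns the minimum quantity for the chosen action.
--     """
--     decisions = [dq[0] for dq in decisions_and_quantities]
--     decision_count = Counter(decisions)
--
--     if decision_count['buy'] >= 2:
--         min_quantity = min(q for d, q in decisions_and_quantities if d == 'buy')
--         return 'buy', min_quantity
--     elif decision_count['sell'] >= 2:
--         min_quantity = min(q for d, q in decisions_and_quantities if d == 'sell')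
--         return 'sell', min_quantity
--     else:
--         return 'hold', 0
-- ===== SOURCE B (Python) =====
-- def majority_decision_and_min_quantity(decisions_and_quantities):
--     buy_count = 0
--     sell_count = 0
--     buy_min = None
--     sell_min = None
--     for d, q in decisions_and_quantities:
--         if d == 'buy':
--             buy_count += 1
--             buy_min = q if buy_min is None else min(buy_min, q)
--         elif d == 'sell':
--             sell_count += 1
--             sell_min = q if sell_min is None else min(sell_min, q)
--     if buy_count >= 2:
--         return 'buy', buy_min
--     elif sell_count >= 2:
--         return 'sell', sell_min
--     else:
--         return 'hold', 0
-- ===== Notes on version B (the rewrite author's own statement) =====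
-- stated objective: alternative
-- what changed: Replaced the Counter over all decisions plus a separate filtered-min pass with one fold that maintains buy/sell counts and running minima simultaneously.
import Mathlib
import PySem

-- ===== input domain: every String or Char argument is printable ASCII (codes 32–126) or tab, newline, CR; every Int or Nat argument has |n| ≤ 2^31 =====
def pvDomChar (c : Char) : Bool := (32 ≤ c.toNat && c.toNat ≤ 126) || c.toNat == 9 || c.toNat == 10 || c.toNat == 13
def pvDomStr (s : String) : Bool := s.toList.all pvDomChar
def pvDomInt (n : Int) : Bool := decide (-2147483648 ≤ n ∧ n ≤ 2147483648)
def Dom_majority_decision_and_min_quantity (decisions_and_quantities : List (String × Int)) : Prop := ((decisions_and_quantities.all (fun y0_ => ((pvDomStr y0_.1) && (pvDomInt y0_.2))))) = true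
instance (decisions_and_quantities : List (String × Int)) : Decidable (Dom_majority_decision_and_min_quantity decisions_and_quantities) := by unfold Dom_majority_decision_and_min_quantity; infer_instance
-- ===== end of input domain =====

-- B replaces the Counter + separate filtered-min passes with one fold maintaining
-- buy/sell counts and running minima (alternative decomposition, same cost).


-- ===== PORT A =====
-- decisions = [dq[0] for dq in ...]; Counter lookup ported as List.count; min over the
-- filtered quantities via PySem.List.min? — the .getD 0 is unreachable (count ≥ 2 ⇒ nonempty).
def majority_decision_and_min_quantity (decisions_and_quantities : List (String × Int)) : String × Int :=
  let decisions := decisions_and_quantities.map (fun dq => dq.1)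
  if 2 ≤ decisions.count "buy" then
    ("buy", (PySem.List.min? ((decisions_and_quantities.filter (fun p => p.1 == "buy")).map (fun p => p.2)) (fun y => y)).getD 0)
  else if 2 ≤ decisions.count "sell" then
    ("sell", (PySem.List.min? ((decisions_and_quantities.filter (fun p => p.1 == "sell")).map (fun p => p.2)) (fun y => y)).getD 0)
  else
    ("hold", 0)

-- ===== PORT B =====
-- buy_min = q if buy_min is None else min(buy_min, q)
def pvOMin (o : Option Int) (q : Int) : Int :=
  match o with
  | none => q
  | some m => min m q

def pvStep (s : Nat × Nat × Option Int × Option Int) (p : String × Int) :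
    Nat × Nat × Option Int × Option Int :=
  if p.1 == "buy" then (s.1 + 1, s.2.1, some (pvOMin s.2.2.1 p.2), s.2.2.2)
  else if p.1 == "sell" then (s.1, s.2.1 + 1, s.2.2.1, some (pvOMin s.2.2.2 p.2))
  else s

def majority_decision_and_min_quantity_alt (decisions_and_quantities : List (String × Int)) : String × Int :=
  let s := decisions_and_quantities.foldl pvStep (0, 0, none, none)
  if 2 ≤ s.1 then ("buy", s.2.2.1.getD 0)
  else if 2 ≤ s.2.1 then ("sell", s.2.2.2.getD 0)
  else ("hold", 0)

-- ===== PRECONDITION & SPEC =====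
def Spec_majority_decision_and_min_quantity (decisions_and_quantities : List (String × Int)) (out : String × Int) : Prop := out = majority_decision_and_min_quantity_alt decisions_and_quantities
instance (decisions_and_quantities : List (String × Int)) (out : String × Int) : Decidable (Spec_majority_decision_and_min_quantity decisions_and_quantities out) := by unfold Spec_majority_decision_and_min_quantity; infer_instance

-- ===== CLAIM (what is proved, stated in full; the proofs are below) =====
def Claim_equal_majority_decision_and_min_quantity : Prop := ∀ (decisions_and_quantities : List (String × Int)), Dom_majority_decision_and_min_quantity decisions_and_quantities → Spec_majority_decision_and_min_quantity decisions_and_quantities (majority_decision_and_min_quantity decisions_and_quantities)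

-- ===== LEMMAS AND PROOFS =====

-- B's fold, started from any state, computes the counts and running minima of the list.
theorem pvFold_inv (l : List (String × Int)) :
    ∀ (bc sc : Nat) (bm sm : Option Int),
    l.foldl pvStep (bc, sc, bm, sm) =
      (bc + (l.map Prod.fst).count "buy",
       sc + (l.map Prod.fst).count "sell",
       (l.filter (fun p => p.1 == "buy")).foldl (fun a p => some (pvOMin a p.2)) bm,
       (l.filter (fun p => p.1 == "sell")).foldl (fun a p => some (pvOMin a p.2)) sm) := by
  induction l with
  | nil => simp
  | cons h t ih =>
    intro bc sc bm sm
    by_cases hb : h.1 = "buy"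
    · simp [pvStep, hb, ih, Nat.add_comm, Nat.add_assoc]
    · by_cases hs : h.1 = "sell"
      · simp [pvStep, hs, ih, Nat.add_comm, Nat.add_assoc]
      · simp [pvStep, hb, hs, ih]

-- Python's min over a nonempty list equals the running-min fold started at none.
theorem pvMin_eq_fold (xs : List Int) :
    PySem.List.min? xs (fun y => y) = xs.foldl (fun a q => some (pvOMin a q)) none := by
  cases xs with
  | nil => simp [PySem.List.min?_eq_none_iff]
  | cons x t =>
    rw [PySem.List.min?_id_cons]
    simp only [List.foldl_cons, pvOMin]
    induction t generalizing x with
    | nil => rfl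
    | cons y s ih => simp [ih]

theorem pvMin_eq_fold' (l : List (String × Int)) (d : String) :
    (PySem.List.min? ((l.filter (fun p => p.1 == d)).map (fun p => p.2)) (fun y => y)).getD 0 =
      ((l.filter (fun p => p.1 == d)).foldl (fun a p => some (pvOMin a p.2)) none).getD 0 := by
  rw [pvMin_eq_fold, List.foldl_map]

-- ===== VERDICT (by name: the statement is the Claim_ definition above) =====
theorem majority_decision_and_min_quantity_spec : Claim_equal_majority_decision_and_min_quantity := by
  intro l _
  show majority_decision_and_min_quantity l = majority_decision_and_min_quantity_alt l
  unfold majority_decision_and_min_quantity majority_decision_and_min_quantity_alt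
  rw [pvFold_inv]
  simp [pvMin_eq_fold' l "buy", pvMin_eq_fold' l "sell"]
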